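-- pv_equiv track=rewrite | github.com/lijinquan123/little-funny | utils/md5creator.py | scaler
-- ===== SOURCE A (Python) =====
-- def scaler(chunk_size: int, dw: str):
--     supports = ['t', 'g', 'm', 'k']
--     chunk_size = int(chunk_size)
--     dw = dw.lower()
--     is_matched = False
--     while supports:
--         d = supports.pop(0)
--         if d == dw:
--             is_matched = True
--         if is_matched:
--             chunk_size *= 1024
--     return chunk_size
-- ===== SOURCE B (Python) =====
-- def scaler(chunk_size: int, dw: str):
--     chunk_size = int(chunk_size)
--     return chunk_size * 1024 ** {'t': 4, 'g': 3, 'm': 2, 'k': 1}.get(dw.lower(), 0)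
-- ===== Notes on version B (the rewrite author's own statement) =====
-- stated objective: simpler
-- what changed: Replaces the pop-from-list loop with a mutable matched flag by a single closed-form exponentiation chunk_size * 1024**e, with e looked up in a unit->tier dict (default 0).
import Mathlib
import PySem

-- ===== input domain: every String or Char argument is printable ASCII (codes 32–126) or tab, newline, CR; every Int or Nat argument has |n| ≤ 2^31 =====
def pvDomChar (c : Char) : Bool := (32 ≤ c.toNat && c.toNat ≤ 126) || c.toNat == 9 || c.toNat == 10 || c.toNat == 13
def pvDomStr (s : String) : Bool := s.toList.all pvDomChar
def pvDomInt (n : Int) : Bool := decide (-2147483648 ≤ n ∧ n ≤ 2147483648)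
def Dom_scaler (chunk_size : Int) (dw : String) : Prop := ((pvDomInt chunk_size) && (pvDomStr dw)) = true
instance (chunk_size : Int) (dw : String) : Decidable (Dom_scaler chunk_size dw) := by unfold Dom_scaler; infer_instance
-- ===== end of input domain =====

-- ===== PORT A =====
-- B replaces A's pop-loop with matched flag by a closed-form 1024^tier lookup (objective: simpler).
def scaler (chunk_size : Int) (dw : String) : Int :=
  let dwl := PySem.Str.lower dw
  -- while supports: d = supports.pop(0); if d == dw: is_matched = True; if is_matched: chunk_size *= 1024
  (["t", "g", "m", "k"].foldl
    (fun (st : Int × Bool) (d : String) =>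
      let m := if d == dwl then true else st.2
      (if m then st.1 * 1024 else st.1, m))
    (chunk_size, false)).1

-- ===== PORT B =====
def scaler_alt (chunk_size : Int) (dw : String) : Int :=
  chunk_size * 1024 ^ ((PySem.Dict.ofList ([("t", 4), ("g", 3), ("m", 2), ("k", 1)] : List (String × Int))).getD (PySem.Str.lower dw) 0).toNat

-- ===== PRECONDITION & SPEC =====
def Spec_scaler (chunk_size : Int) (dw : String) (out : Int) : Prop := out = scaler_alt chunk_size dw
instance (chunk_size : Int) (dw : String) (out : Int) : Decidable (Spec_scaler chunk_size dw out) := by unfold Spec_scaler; infer_instance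

-- ===== CLAIM (what is proved, stated in full; the proofs are below) =====
def Claim_equal_scaler : Prop := ∀ (chunk_size : Int) (dw : String), Dom_scaler chunk_size dw → Spec_scaler chunk_size dw (scaler chunk_size dw)

-- ===== LEMMAS AND PROOFS =====

-- ===== VERDICT (by name: the statement is the Claim_ definition above) =====
-- helper: values of the tier dict on each unit and off the units
def pvTiers : PySem.Dict String Int :=
  PySem.Dict.ofList ([("t", 4), ("g", 3), ("m", 2), ("k", 1)] : List (String × Int))

theorem pvTiers_none (s : String) (h1 : ¬ "t" = s) (h2 : ¬ "g" = s) (h3 : ¬ "m" = s)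
    (h4 : ¬ "k" = s) : pvTiers.getD s 0 = 0 := by
  rw [show pvTiers = PySem.Dict.mk [("t", 4), ("g", 3), ("m", 2), ("k", 1)] from by decide]
  simp [PySem.Dict.getD, PySem.Dict.get?, h1, h2, h3, h4]

theorem scaler_spec : Claim_equal_scaler := by
  intro cs dw _
  unfold Spec_scaler scaler scaler_alt
  simp only [List.foldl]
  rw [show PySem.Dict.ofList ([("t", 4), ("g", 3), ("m", 2), ("k", 1)] : List (String × Int)) = pvTiers from rfl]
  by_cases h1 : ("t" : String) = PySem.Str.lower dw
  · rw [← h1]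
    rw [show pvTiers.getD "t" 0 = 4 from by decide, show Int.toNat 4 = 4 from rfl]
    simp
    ring
  · by_cases h2 : ("g" : String) = PySem.Str.lower dw
    · rw [← h2]
      rw [show pvTiers.getD "g" 0 = 3 from by decide]
      simp [show ¬ (("t" : String) == "g") = true from by decide]
      ring
    · by_cases h3 : ("m" : String) = PySem.Str.lower dw
      · rw [← h3]
        rw [show pvTiers.getD "m" 0 = 2 from by decide]
        simp [show ¬ (("t" : String) == "m") = true from by decide,
              show ¬ (("g" : String) == "m") = true from by decide]
        ring
      · by_cases h4 : ("k" : String) = PySem.Str.lower dw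
        · rw [← h4]
          rw [show pvTiers.getD "k" 0 = 1 from by decide]
          simp [show ¬ (("t" : String) == "k") = true from by decide,
                show ¬ (("g" : String) == "k") = true from by decide,
                show ¬ (("m" : String) == "k") = true from by decide]
        · rw [pvTiers_none _ h1 h2 h3 h4]
          simp [h1, h2, h3, h4]
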